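-- pv_equiv track=rewrite | github.com/aryn-ai/sycamore | examples/query/synth_data_llm_filter.py | zero_run_lengths
-- ===== SOURCE A (Python) =====
-- def zero_run_lengths(arr):
--     result = []
--     count = 0
--     for val in arr:
--         if val == 0:
--             count += 1
--         else:
--             count = 0
--         result.append(count)
--     return result
-- ===== SOURCE B (Python) =====
-- def zero_run_lengths(arr):
--     # Run-based: split arr into maximal runs; zeros emit 1..run_length, non-zeros emit 0.
--     result = []
--     i = 0
--     n = len(arr)
--     while i < n:
--         if arr[i] == 0:
--             j = i
--             while j < n and arr[j] == 0:
--                 j += 1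
--             result.extend(range(1, j - i + 1))
--             i = j
--         else:
--             result.append(0)
--             i += 1
--     return result
-- ===== Notes on version B (the rewrite author's own statement) =====
-- stated objective: alternative
-- what changed: Replaced the per-element running counter with a run-based scan: split the list into maximal zero runs and emit 1..run_length per zero run via range, 0 for each non-zero element.
import Mathlib
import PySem

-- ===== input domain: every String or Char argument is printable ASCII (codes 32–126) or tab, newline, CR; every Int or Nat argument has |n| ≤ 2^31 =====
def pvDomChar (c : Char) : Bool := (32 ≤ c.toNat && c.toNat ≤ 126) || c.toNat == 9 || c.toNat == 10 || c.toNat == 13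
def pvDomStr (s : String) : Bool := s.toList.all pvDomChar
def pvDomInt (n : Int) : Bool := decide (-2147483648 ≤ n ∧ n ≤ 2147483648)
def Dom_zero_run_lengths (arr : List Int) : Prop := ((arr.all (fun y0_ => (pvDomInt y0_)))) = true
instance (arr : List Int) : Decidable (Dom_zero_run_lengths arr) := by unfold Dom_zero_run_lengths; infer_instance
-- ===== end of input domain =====

-- B traverses maximal zero-runs instead of keeping a per-element running counter (alternative decomposition; return value only).
-- ===== PORT A =====
-- A: running counter, one element at a time (structural recursion over the list carrying the count).
def aGo : List Int → Int → List Int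
  | [], _ => []
  | v :: vs, c =>
    let c' := if v = 0 then c + 1 else 0
    c' :: aGo vs c'

def zero_run_lengths (arr : List Int) : List Int := aGo arr 0

-- ===== PORT B =====
-- zeroRun xs = (length of maximal leading zero run, the rest of the list)
def zeroRun : List Int → Nat × List Int
  | [] => (0, [])
  | x :: xs => if x = 0 then ((zeroRun xs).1 + 1, (zeroRun xs).2) else (0, x :: xs)

theorem zeroRun_len : ∀ (xs : List Int), (zeroRun xs).2.length ≤ xs.length := by
  intro xs
  induction xs with
  | nil => simp [zeroRun]
  | cons x xs ih =>
    simp only [zeroRun]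
    split
    · exact le_trans ih (Nat.le_succ _)
    · simp

def altGo : List Int → List Int
  | [] => []
  | x :: xs =>
    if x = 0 then
      (List.range ((zeroRun xs).1 + 1)).map (fun i => Int.ofNat i + 1) ++ altGo (zeroRun xs).2
    else
      0 :: altGo xs
termination_by xs => xs.length
decreasing_by
  · exact Nat.lt_succ_of_le (zeroRun_len xs)
  · simp

def zero_run_lengths_alt (arr : List Int) : List Int := altGo arr

-- ===== PRECONDITION & SPEC =====
def Spec_zero_run_lengths (arr : List Int) (out : List Int) : Prop := out = zero_run_lengths_alt arr
instance (arr : List Int) (out : List Int) : Decidable (Spec_zero_run_lengths arr out) := by unfold Spec_zero_run_lengths; infer_instance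

-- ===== CLAIM (what is proved, stated in full; the proofs are below) =====
def Claim_equal_zero_run_lengths : Prop := ∀ (arr : List Int), Dom_zero_run_lengths arr → Spec_zero_run_lengths arr (zero_run_lengths arr)

-- ===== LEMMAS AND PROOFS =====

-- ===== VERDICT (by name: the statement is the Claim_ definition above) =====
-- Key lemma: from any count c, A's loop over xs emits c+1, c+2, … across the leading
-- zero run, then continues from count 0 on the rest.
theorem aGo_run : ∀ (xs : List Int) (c : Int),
    aGo xs c = (List.range (zeroRun xs).1).map (fun i => c + 1 + Int.ofNat i) ++ aGo (zeroRun xs).2 0 := by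
  intro xs
  induction xs with
  | nil => intro c; simp [zeroRun, aGo]
  | cons x xs ih =>
    intro c
    by_cases hx : x = 0
    · rw [show zeroRun (x :: xs) = ((zeroRun xs).1 + 1, (zeroRun xs).2) from by
        simp [zeroRun, hx]]
      rw [show aGo (x :: xs) c = (c + 1) :: aGo xs (c + 1) from by simp [aGo, hx]]
      rw [List.range_succ_eq_map, List.map_cons, List.map_map, ih (c + 1)]
      simp only [List.cons_append]
      congr 1
      · simp
      · congr 1
        apply List.map_congr_left
        intro i _
        simp only [Function.comp, Int.ofNat_eq_natCast]
        push_cast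
        ring
    · rw [show zeroRun (x :: xs) = (0, x :: xs) from by simp [zeroRun, hx]]
      simp [aGo, hx]

theorem altGo_eq : ∀ (n : Nat) (xs : List Int), xs.length ≤ n → altGo xs = aGo xs 0 := by
  intro n
  induction n with
  | zero =>
    intro xs h
    have hnil : xs = [] := List.eq_nil_of_length_eq_zero (Nat.le_zero.mp h)
    subst hnil; simp [altGo, aGo]
  | succ n ih =>
    intro xs h
    match xs with
    | [] => simp [altGo, aGo]
    | x :: xs =>
      by_cases hx : x = 0
      · rw [altGo, if_pos hx]
        rw [show aGo (x :: xs) 0 = (1 : Int) :: aGo xs 1 from by simp [aGo, hx]]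
        rw [aGo_run xs 1]
        rw [List.range_succ_eq_map, List.map_cons, List.map_map]
        simp only [List.cons_append]
        congr 1
        · congr 1
          · apply List.map_congr_left
            intro i _
            simp only [Function.comp, Int.ofNat_eq_natCast]
            push_cast
            ring
          · exact ih _ (le_trans (zeroRun_len xs) (Nat.le_of_succ_le_succ h))
      · rw [altGo, if_neg hx]
        rw [show aGo (x :: xs) 0 = (0 : Int) :: aGo xs 0 from by simp [aGo, hx]]
        exact congrArg _ (ih xs (Nat.le_of_succ_le_succ h))

theorem zero_run_lengths_spec : Claim_equal_zero_run_lengths := by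
  intro arr _
  unfold Spec_zero_run_lengths zero_run_lengths zero_run_lengths_alt
  exact (altGo_eq arr.length arr le_rfl).symm
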